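-- pv_equiv track=rewrite | github.com/wangl-cc/juliacomplete-nvim-client | rplugin/python3/juliacomplete.py | findstart
-- ===== SOURCE A (Python) =====
-- def findstart(line, pos):
--     if pos == 0:
--         return 0
--     line = line[0:pos]
--     findusing = line.rfind("using ")
--     findimport = line.rfind("import ")
--     for i in range(pos-1, -1, -1):
--         if line[i] in (' ', '(', ')', '[', ']', '{', '}', '=', '!', '+', '-', '+', '*', '&', '#', '$', '%', '^', '<', '>', '?', ',', ':', ';'):
--             if line[i] == ' ':
--                 if i == findusing+5:
--                     return findusing
--                 elif i == findimport+6: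
--                     return findimport
--                 else:
--                     return i+1
--             else:
--                 return i+1
--     return 0
-- ===== SOURCE B (Python) =====
-- DELIMS = " ()[]{}=!+-*&#$%^<>?,:;"
--
--
-- def findstart(line, pos):
--     if pos <= 0:
--         return 0
--     prefix = line[0:pos]
--     last = max(prefix.rfind(c) for c in DELIMS)
--     if last == -1:
--         return 0
--     if prefix[last] == ' ':
--         u = prefix.rfind("using ")
--         if last == u + 5:
--             return u
--         m = prefix.rfind("import ")
--         if last == m + 6:
--             return m
--     return last + 1
-- ===== Notes on version B (the rewrite author's own statement) =====
-- stated objective: idiomatic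
-- what changed: A's hand-written reverse per-character scan with early returns is replaced by computing the last delimiter position as the max of one str.rfind per delimiter and branching once on that position; the using/import offset logic is kept.
import Mathlib
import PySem

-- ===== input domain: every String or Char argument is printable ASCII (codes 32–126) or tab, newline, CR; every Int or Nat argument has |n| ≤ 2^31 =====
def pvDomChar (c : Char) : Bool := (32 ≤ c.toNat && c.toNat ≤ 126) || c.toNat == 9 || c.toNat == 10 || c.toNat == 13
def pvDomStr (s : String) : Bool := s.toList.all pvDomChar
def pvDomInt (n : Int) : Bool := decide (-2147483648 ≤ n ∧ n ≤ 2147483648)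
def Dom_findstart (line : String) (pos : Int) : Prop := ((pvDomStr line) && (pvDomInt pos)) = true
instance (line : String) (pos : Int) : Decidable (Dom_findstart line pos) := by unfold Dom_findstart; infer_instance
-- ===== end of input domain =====

-- B replaces A's hand-written reverse character scan by one rfind per delimiter (the last
-- delimiter position is the max of those), keeping the using/import offset logic; objective: idiomatic.

-- ===== PORT A =====
-- the delimiter tuple of A, verbatim (including the duplicated '+')
def findstartDelims : List Char :=
  [' ', '(', ')', '[', ']', '{', '}', '=', '!', '+', '-', '+', '*', '&', '#', '$', '%', '^',
   '<', '>', '?', ',', ':', ';']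

-- the 'for i in range(pos-1, -1, -1)' loop with its early returns
def findstartLoop (l : List Char) (fu fi : Int) : List Int → Int
  | [] => 0
  | i :: rest =>
    let c := PySem.List.pyGetD l i ' '
    if findstartDelims.contains c then
      if c = ' ' then
        if i = fu + 5 then fu
        else if i = fi + 6 then fi
        else i + 1
      else i + 1
    else findstartLoop l fu fi rest

def findstart (line : String) (pos : Int) : Int :=
  if pos = 0 then 0
  else
    let l := PySem.List.slice line.toList (some 0) (some pos)
    let findusing := PySem.Chars.rfind l "using ".toList
    let findimport := PySem.Chars.rfind l "import ".toList
    findstartLoop l findusing findimport (PySem.List.pyRange (pos - 1) (-1) (-1))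

-- ===== PORT B =====
def findstartAltDelims : List Char :=
  [' ', '(', ')', '[', ']', '{', '}', '=', '!', '+', '-', '*', '&', '#', '$', '%', '^',
   '<', '>', '?', ',', ':', ';']

def findstart_alt (line : String) (pos : Int) : Int :=
  if pos ≤ 0 then 0
  else
    let pre := PySem.List.slice line.toList (some 0) (some pos)
    -- max(prefix.rfind(c) for c in DELIMS): DELIMS is non-empty, so maxD's default is never used
    let last := PySem.List.maxD (findstartAltDelims.map (fun c => PySem.Chars.rfind pre [c]))
                  (fun x => x) (-1)
    if last = -1 then 0
    else if PySem.List.pyGetD pre last ' ' = ' ' then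
      let u := PySem.Chars.rfind pre "using ".toList
      if last = u + 5 then u
      else
        let m := PySem.Chars.rfind pre "import ".toList
        if last = m + 6 then m else last + 1
    else last + 1

-- ===== PRECONDITION & SPEC =====
-- Pre_ excludes exactly the inputs with pos > len(line), where A raises IndexError (line[i] on the
-- shorter slice); A returns normally everywhere else, including pos ≤ 0.
def Pre_findstart (line : String) (pos : Int) : Prop := pos ≤ PySem.Str.len line
instance (line : String) (pos : Int) : Decidable (Pre_findstart line pos) := by
  unfold Pre_findstart; infer_instance

def pvWitness_findstart : String × Int := ("ab c", 3)

def Spec_findstart (line : String) (pos : Int) (out : Int) : Prop := out = findstart_alt line pos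
instance (line : String) (pos : Int) (out : Int) : Decidable (Spec_findstart line pos out) := by
  unfold Spec_findstart; infer_instance

-- ===== CLAIM (what is proved, stated in full; the proofs are below) =====
def Claim_equal_findstart : Prop := ∀ (line : String) (pos : Int), Dom_findstart line pos →
  Pre_findstart line pos → Spec_findstart line pos (findstart line pos)

-- ===== LEMMAS AND PROOFS =====

-- greatest index i < j with p (l[i]), as an Int; -1 if there is none
def pvLastHit (l : List Char) (p : Char → Bool) : Nat → Int
  | 0 => -1
  | j + 1 => if p (l.getD j ' ') then ((j : Nat) : Int) else pvLastHit l p j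

lemma pvLastHit_bounds (l : List Char) (p : Char → Bool) (j : Nat) :
    -1 ≤ pvLastHit l p j ∧ pvLastHit l p j < j := by
  induction j with
  | zero => simp only [pvLastHit]; omega
  | succ j ih => simp only [pvLastHit]; split <;> omega

lemma pvLastHit_false (l : List Char) (j : Nat) : pvLastHit l (fun _ => false) j = -1 := by
  induction j with
  | zero => rfl
  | succ j ih => simpa [pvLastHit] using ih

lemma pvLastHit_or (l : List Char) (p q : Char → Bool) (j : Nat) :
    pvLastHit l (fun x => p x || q x) j = max (pvLastHit l p j) (pvLastHit l q j) := by
  induction j with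
  | zero => simp [pvLastHit]
  | succ j ih =>
    have hp := pvLastHit_bounds l p j
    have hq := pvLastHit_bounds l q j
    simp only [pvLastHit, ih]
    rcases hpj : p (l.getD j ' ') <;> rcases hqj : q (l.getD j ' ') <;>
      simp <;> omega

lemma pvRfind_go_eq (l : List Char) (c : Char) :
    ∀ j : Nat, j < l.length →
      PySem.Chars.rfind.go l [c] j = pvLastHit l (fun x => x == c) (j + 1) := by
  intro j
  induction j with
  | zero =>
    intro h0
    cases l with
    | nil => simp at h0
    | cons x xs =>
      rcases eq_or_ne x c with hc | hc
      · subst hc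
        simp [PySem.Chars.rfind.go, pvLastHit, List.isPrefixOf]
      · simp [PySem.Chars.rfind.go, pvLastHit, List.isPrefixOf, hc, hc.symm]
  | succ j ih =>
    intro h
    have hdrop : l.drop (j + 1) = l[j + 1] :: l.drop (j + 2) := List.drop_eq_getElem_cons h
    have hget : l.getD (j + 1) ' ' = l[j + 1] := List.getD_eq_getElem l ' ' h
    have hgo : PySem.Chars.rfind.go l [c] (j + 1) =
        if [c].isPrefixOf (l.drop (j + 1)) then ((j + 1 : Nat) : Int)
        else PySem.Chars.rfind.go l [c] j := by
      simp only [PySem.Chars.rfind.go]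
    have hpre : [c].isPrefixOf (l.drop (j + 1)) = (c == l[j + 1]) := by
      rw [hdrop]; simp [List.isPrefixOf]
    rw [hgo, ih (by omega)]
    conv_rhs => rw [pvLastHit]
    simp only [hget, hpre]
    rcases eq_or_ne l[j + 1] c with hc | hc
    · rw [hc]
    · simp [hc, hc.symm]

lemma pvRfind_single (l : List Char) (c : Char) :
    PySem.Chars.rfind l [c] = pvLastHit l (fun x => x == c) l.length := by
  show PySem.Chars.rfind.go l [c] l.length = _
  cases hl : l.length with
  | zero =>
    have hnil : l = [] := List.eq_nil_of_length_eq_zero hl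
    subst hnil
    rfl
  | succ m =>
    have hdrop : l.drop (m + 1) = [] := by
      rw [← hl]; exact List.drop_length
    have := pvRfind_go_eq l c m (by omega)
    simp [PySem.Chars.rfind.go, hdrop, this]

lemma pvRfind_bounds (l : List Char) (c : Char) : -1 ≤ PySem.Chars.rfind l [c] := by
  rw [pvRfind_single]
  exact (pvLastHit_bounds l _ l.length).1

lemma pvFoldlMaxR (l : List Char) :
    ∀ (ds : List Char) (a : Int), -1 ≤ a →
      List.foldl max a (ds.map (fun c => PySem.Chars.rfind l [c])) =
        max a (pvLastHit l (fun x => ds.contains x) l.length) := by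
  intro ds
  induction ds with
  | nil =>
    intro a ha
    have hfalse : (fun x => ([] : List Char).contains x) = (fun _ : Char => false) := rfl
    simp only [List.map_nil, List.foldl_nil, hfalse, pvLastHit_false]
    omega
  | cons c ds ih =>
    intro a ha
    simp only [List.map_cons, List.foldl_cons]
    rw [ih (max a (PySem.Chars.rfind l [c])) (by have := pvRfind_bounds l c; omega)]
    have hcont : (fun x => (c :: ds).contains x) = (fun x => (x == c) || ds.contains x) := by
      funext x; rcases eq_or_ne x c with hx | hx <;> simp [hx]
    rw [hcont, pvLastHit_or, pvRfind_single, max_assoc]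

-- B's branch / A's loop-body branch on the last delimiter index
def pvBranch (l : List Char) (i fu fi : Int) : Int :=
  if PySem.List.pyGetD l i ' ' = ' ' then
    if i = fu + 5 then fu
    else if i = fi + 6 then fi
    else i + 1
  else i + 1

lemma pvLoopA (l : List Char) (fu fi : Int) :
    ∀ j : Nat, j ≤ l.length →
      findstartLoop l fu fi (PySem.List.pyRange ((j : Int) - 1) (-1) (-1)) =
        (if pvLastHit l (fun x => findstartDelims.contains x) j = -1 then 0
         else pvBranch l (pvLastHit l (fun x => findstartDelims.contains x) j) fu fi) := by
  intro j
  induction j with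
  | zero =>
    intro _
    rw [PySem.List.pyRange_neg_one_eq_nil (by norm_num)]
    simp [findstartLoop, pvLastHit]
  | succ j ih =>
    intro h
    have h1 : ((j + 1 : Nat) : Int) - 1 = (j : Int) := by push_cast; ring
    rw [h1, PySem.List.pyRange_neg_one_cons (by omega)]
    have hget : PySem.List.pyGetD l (j : Int) ' ' = l.getD j ' ' := by
      simp [PySem.List.pyGetD_natCast]
    by_cases hc : findstartDelims.contains (l.getD j ' ')
    · have hne : ((j : Nat) : Int) ≠ -1 := by omega
      simp only [findstartLoop, hget, hc, if_true, pvLastHit, pvBranch, if_neg hne]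
    · have hcf : findstartDelims.contains (l.getD j ' ') = false := by
        simpa using hc
      simp only [findstartLoop, hget, hcf, Bool.false_eq_true, if_false, pvLastHit]
      exact ih (by omega)

lemma pvContains_eq (x : Char) : findstartDelims.contains x = findstartAltDelims.contains x := by
  simp only [findstartDelims, findstartAltDelims]
  rcases eq_or_ne x '+' with hx | hx <;> simp [hx]

lemma pvMaxD_rfind (l : List Char) (c : Char) (ds : List Char) :
    PySem.List.maxD ((c :: ds).map (fun x => PySem.Chars.rfind l [x])) (fun x => x) (-1) =
      pvLastHit l (fun x => (c :: ds).contains x) l.length := by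
  simp only [List.map_cons]
  unfold PySem.List.maxD
  rw [PySem.List.max?_id_cons]
  simp only [Option.getD_some]
  rw [pvFoldlMaxR l ds _ (pvRfind_bounds l c)]
  have hcont : (fun x => (c :: ds).contains x) = (fun x => (x == c) || ds.contains x) := by
    funext x; rcases eq_or_ne x c with hx | hx <;> simp [hx]
  rw [hcont, pvLastHit_or, pvRfind_single]

lemma pvAltLast (l : List Char) :
    PySem.List.maxD (findstartAltDelims.map (fun c => PySem.Chars.rfind l [c])) (fun x => x) (-1) =
      pvLastHit l (fun x => findstartAltDelims.contains x) l.length :=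
  pvMaxD_rfind l ' '
    ['(', ')', '[', ']', '{', '}', '=', '!', '+', '-', '*', '&', '#', '$', '%', '^',
     '<', '>', '?', ',', ':', ';']

-- ===== VERDICT (by name: the statement is the Claim_ definition above) =====
theorem findstart_spec : Claim_equal_findstart := by
  intro line pos hdom hpre
  unfold Spec_findstart
  unfold Pre_findstart at hpre
  by_cases h0 : pos ≤ 0
  · simp only [findstart, findstart_alt, if_pos h0]
    rcases eq_or_lt_of_le h0 with he | hl
    · rw [if_pos he]
    · rw [if_neg (by omega : ¬ pos = 0),
        PySem.List.pyRange_neg_one_eq_nil (by omega)]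
      rfl
  · have hn : pos ≤ (line.toList.length : Int) := by
      have : PySem.Str.len line = (line.toList.length : Int) := by
        simp [PySem.Str.len_eq]
      omega
    have hslice : PySem.List.slice line.toList (some 0) (some pos) =
        line.toList.take pos.toNat := by
      rw [PySem.List.slice_zero_start, PySem.List.slice_to line.toList (by omega)]
    simp only [findstart, findstart_alt, if_neg (by omega : ¬ pos = 0),
      if_neg (by omega : ¬ pos ≤ 0), hslice]
    set l := line.toList.take pos.toNat with hldef
    have hlen : l.length = pos.toNat := by
      rw [hldef, List.length_take]; omega
    rw [show pos - 1 = ((pos.toNat : Nat) : Int) - 1 by omega]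
    rw [pvLoopA l _ _ pos.toNat (by omega)]
    rw [pvAltLast l, hlen]
    have hfun : (fun x => findstartAltDelims.contains x) =
        (fun x => findstartDelims.contains x) := by
      funext x; exact (pvContains_eq x).symm
    rw [hfun]
    simp only [pvBranch]
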